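-- pv_equiv track=rewrite | github.com/kocsist-git/UniversityOfSzeged-Python | 3-gyakorlo-feladatsor/9-feladat.py | kasszahoz_rendel
-- ===== SOURCE A (Python) =====
-- def kasszahoz_rendel(szamok):
--     szamLista = szamok.split(";")
--     paros=list()
--     paratlan=list()
--     for szam in szamLista:
--         if int(szam) % 2 == 0:
--             paros.append(szam)
--         else:
--             paratlan.append(szam)
--
--     dubla = list()
--     if len(paros)>0: dubla.append(sorted(paros))
--     if len(paratlan)>0:dubla.append(sorted(paratlan))
--     return dubla
-- ===== SOURCE B (Python) =====
-- def kasszahoz_rendel(szamok):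
--     # one sort with a composite (parity, token) key puts all even tokens (sorted
--     # among themselves) contiguously before all odd tokens (sorted among themselves);
--     # then just slice at the even-count boundary -- no partition into two lists.
--     rend = sorted(szamok.split(";"), key=lambda s: (int(s) % 2, s))
--     hatar = sum(1 for s in rend if int(s) % 2 == 0)
--     return [csoport for csoport in (rend[:hatar], rend[hatar:]) if csoport]
-- ===== Notes on version B (the rewrite author's own statement) =====
-- stated objective: alternative
-- what changed: B replaces A's partition-into-two-lists loop plus two independent sorts with a single sort under a composite (parity, token) key, which puts all even tokens (sorted) contiguously before all odd tokens (sorted), and then slices the one sorted list at the even-count boundary.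
-- outside the precondition, e.g. on kasszahoz_rendel(';'): A raises ValueError, B raises ValueError
import Mathlib
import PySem

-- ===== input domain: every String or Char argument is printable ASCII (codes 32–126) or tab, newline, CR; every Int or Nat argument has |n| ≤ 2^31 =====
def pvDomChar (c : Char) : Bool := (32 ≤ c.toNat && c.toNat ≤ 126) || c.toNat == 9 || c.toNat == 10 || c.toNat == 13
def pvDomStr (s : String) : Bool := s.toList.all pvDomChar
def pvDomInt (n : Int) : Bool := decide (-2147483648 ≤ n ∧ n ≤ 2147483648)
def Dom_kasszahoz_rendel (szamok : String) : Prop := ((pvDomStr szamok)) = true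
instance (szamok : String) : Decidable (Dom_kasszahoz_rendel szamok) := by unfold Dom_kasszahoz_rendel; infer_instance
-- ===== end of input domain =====

-- B sorts the token list ONCE with a composite (parity, token) key and slices it at the even-count boundary, instead of A's partition-into-two-lists loop followed by two independent sorts; alternative decomposition, same cost.


-- ===== PORT A =====
-- int(szam) % 2 (Python % = fmod); Pre_ guarantees ofStr? is some, so getD 0 is never taken on admitted inputs
def pvParitas (szam : String) : Int := PySem.Int.mod ((PySem.Int.ofStr? szam).getD 0) 2

-- int(szam) % 2 == 0
def pvParos (szam : String) : Bool := pvParitas szam == 0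

def kasszahoz_rendel (szamok : String) : List (List String) :=
  let szamLista := ((PySem.Str.split? szamok ";").getD [])
  let pq := szamLista.foldl
    (fun (acc : List String × List String) szam =>
      if pvParos szam then (acc.1 ++ [szam], acc.2) else (acc.1, acc.2 ++ [szam]))
    ([], [])
  (if pq.1.length > 0 then [PySem.List.sorted pq.1 (fun x => x) false] else []) ++
  (if pq.2.length > 0 then [PySem.List.sorted pq.2 (fun x => x) false] else [])

-- ===== PORT B =====
def kasszahoz_rendel_alt (szamok : String) : List (List String) :=
  let rend := PySem.List.sorted2 (((PySem.Str.split? szamok ";").getD []))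
                pvParitas (fun s => s) false
  let hatar := rend.foldl (fun (n : Int) s => if pvParos s then n + 1 else n) 0
  ([PySem.List.slice rend none (some hatar), PySem.List.slice rend (some hatar) none].filter
    (fun cs => !cs.isEmpty))

-- ===== PRECONDITION & SPEC =====
-- Pre_ excludes exactly the inputs where some ';'-token is not an int literal, on which A's int(szam) raises ValueError.
def Pre_kasszahoz_rendel (szamok : String) : Prop :=
  ∀ t ∈ ((PySem.Str.split? szamok ";").getD []), PySem.Int.ofStr? t ≠ none
instance (szamok : String) : Decidable (Pre_kasszahoz_rendel szamok) := by
  unfold Pre_kasszahoz_rendel; infer_instance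

def pvWitness_kasszahoz_rendel : String := "2;1"

def Spec_kasszahoz_rendel (szamok : String) (out : List (List String)) : Prop := out = kasszahoz_rendel_alt szamok
instance (szamok : String) (out : List (List String)) : Decidable (Spec_kasszahoz_rendel szamok out) := by unfold Spec_kasszahoz_rendel; infer_instance

-- ===== CLAIM (what is proved, stated in full; the proofs are below) =====
def Claim_equal_kasszahoz_rendel : Prop := ∀ (szamok : String), Dom_kasszahoz_rendel szamok → Pre_kasszahoz_rendel szamok → Spec_kasszahoz_rendel szamok (kasszahoz_rendel szamok)

-- ===== LEMMAS AND PROOFS =====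

-- parity is always 0 or 1 (fmod with positive divisor 2)
lemma paritas_cases (s : String) : pvParitas s = 0 ∨ pvParitas s = 1 := by
  have h1 := Int.fmod_nonneg_of_pos (((PySem.Int.ofStr? s).getD 0)) (b := 2) (by norm_num)
  have h2 := Int.fmod_lt_of_pos (((PySem.Int.ofStr? s).getD 0)) (b := 2) (by norm_num)
  unfold pvParitas PySem.Int.mod
  omega

lemma paros_iff (s : String) : pvParos s = true ↔ pvParitas s = 0 := by
  simp [pvParos]

lemma not_paros_iff (s : String) : pvParos s = false ↔ pvParitas s = 1 := by
  rcases paritas_cases s with h | h <;> simp [pvParos, h]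

-- the composite lexicographic key B sorts by
def pvLexKulcs (s : String) : Lex (Int × String) := toLex (pvParitas s, s)

lemma lexKulcs_inj : Function.Injective pvLexKulcs := by
  intro a b h
  have := congrArg (fun x => (ofLex x).2) h
  simpa [pvLexKulcs] using this

-- B's sorted2 with keys (parity, id) IS sorted with the lexicographic key
lemma sorted2_eq_sorted_lex (L : List String) :
    PySem.List.sorted2 L pvParitas (fun s => s) false
      = PySem.List.sorted L pvLexKulcs false := by
  rw [PySem.List.sorted_eq_foldl_insertBy]
  show L.foldl (fun acc x => PySem.List.insertBy _ x acc) [] = _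
  have hb : (fun a b => decide (pvParitas a < pvParitas b) ||
        (!decide (pvParitas b < pvParitas a) && decide (a < b)))
      = (fun a b => decide (pvLexKulcs a < pvLexKulcs b)) := by
    funext a b
    simp only [pvLexKulcs, Prod.Lex.toLex_lt_toLex]
    rcases lt_trichotomy (pvParitas a) (pvParitas b) with h | h | h <;>
      simp [h, not_lt_of_gt] <;> omega
  rw [hb]
  simp

-- sorting by the (parity, token) key = sorted evens followed by sorted odds
lemma sorted_lex_split (L : List String) :
    PySem.List.sorted L pvLexKulcs false
      = PySem.List.sorted (L.filter pvParos) (fun x => x) false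
        ++ PySem.List.sorted (L.filter (fun s => !(pvParos s))) (fun x => x) false := by
  apply PySem.List.eq_of_perm_of_pairwise_le_of_injective pvLexKulcs lexKulcs_inj
  · -- permutation: both rearrange L
    refine ((PySem.List.sorted_perm L pvLexKulcs false).trans ?_)
    refine ((List.filter_append_perm pvParos L).symm.trans ?_)
    exact ((PySem.List.sorted_perm (L.filter pvParos) (fun x => x) false).symm.append
      ((PySem.List.sorted_perm (L.filter (fun s => !(pvParos s))) (fun x => x) false).symm))
  · exact PySem.List.sorted_pairwise L pvLexKulcs
  · -- the concatenation is pairwise ≤ under the lexicographic key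
    rw [List.pairwise_append]
    refine ⟨?_, ?_, ?_⟩
    · refine List.Pairwise.imp_of_mem ?_
        (PySem.List.sorted_pairwise (L.filter pvParos) (fun x => x))
      intro a b ha hb hab
      have ha' := (List.mem_filter.mp ((PySem.List.mem_sorted _ _ _ _).mp ha)).2
      have hb' := (List.mem_filter.mp ((PySem.List.mem_sorted _ _ _ _).mp hb)).2
      simp only [pvLexKulcs, Prod.Lex.toLex_le_toLex]
      exact Or.inr ⟨by rw [(paros_iff a).mp ha', (paros_iff b).mp hb'], hab⟩
    · refine List.Pairwise.imp_of_mem ?_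
        (PySem.List.sorted_pairwise (L.filter (fun s => !(pvParos s))) (fun x => x))
      intro a b ha hb hab
      have ha' : pvParos a = false := by
        simpa using (List.mem_filter.mp ((PySem.List.mem_sorted _ _ _ _).mp ha)).2
      have hb' : pvParos b = false := by
        simpa using (List.mem_filter.mp ((PySem.List.mem_sorted _ _ _ _).mp hb)).2
      simp only [pvLexKulcs, Prod.Lex.toLex_le_toLex]
      exact Or.inr ⟨by rw [(not_paros_iff a).mp ha', (not_paros_iff b).mp hb'], hab⟩
    · intro a ha b hb
      have ha' : pvParos a = true := by
        have := ((PySem.List.mem_sorted _ _ _ _).mp ha)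
        exact (List.mem_filter.mp this).2
      have hb' : pvParos b = false := by
        have := ((PySem.List.mem_sorted _ _ _ _).mp hb)
        simpa using (List.mem_filter.mp this).2
      simp only [pvLexKulcs, Prod.Lex.toLex_le_toLex]
      left
      rw [(paros_iff a).mp ha', (not_paros_iff b).mp hb']
      norm_num

-- the counting fold is countP, cast to Int
lemma foldl_count (p : String → Bool) (L : List String) (n : Int) :
    L.foldl (fun (n : Int) s => if p s then n + 1 else n) n = n + (L.countP p : Int) := by
  induction L generalizing n with
  | nil => simp
  | cons x xs ih =>
    by_cases h : p x <;> simp [List.foldl_cons, h, ih] <;> omega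

-- A's partition loop builds exactly the two filters of the token list
lemma foldl_partition (p : String → Bool) (L a b : List String) :
    L.foldl (fun (acc : List String × List String) s =>
        if p s then (acc.1 ++ [s], acc.2) else (acc.1, acc.2 ++ [s])) (a, b)
      = (a ++ L.filter p, b ++ L.filter (fun s => !(p s))) := by
  induction L generalizing a b with
  | nil => simp
  | cons x xs ih =>
    by_cases h : p x <;> simp [List.foldl_cons, h, ih]

-- every element of sorted(evens) is even, none of sorted(odds) is
lemma countP_sorted_split (L : List String) :
    ((PySem.List.sorted (L.filter pvParos) (fun x => x) false
        ++ PySem.List.sorted (L.filter (fun s => !(pvParos s))) (fun x => x) false).countP pvParos)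
      = (PySem.List.sorted (L.filter pvParos) (fun x => x) false).length := by
  rw [List.countP_append]
  have h1 : (PySem.List.sorted (L.filter pvParos) (fun x => x) false).countP pvParos
      = (PySem.List.sorted (L.filter pvParos) (fun x => x) false).length := by
    apply List.countP_eq_length.mpr
    intro a ha
    exact (List.mem_filter.mp ((PySem.List.mem_sorted _ _ _ _).mp ha)).2
  have h2 : (PySem.List.sorted (L.filter (fun s => !(pvParos s))) (fun x => x) false).countP pvParos
      = 0 := by
    apply List.countP_eq_zero.mpr
    intro a ha
    simpa using (List.mem_filter.mp ((PySem.List.mem_sorted _ _ _ _).mp ha)).2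
  omega

lemma filter_sorted_nil (p : String → Bool) (L : List String) :
    PySem.List.sorted (L.filter p) (fun x => x) false = [] ↔ L.filter p = [] := by
  rw [PySem.List.sorted_eq_nil_iff]

-- ===== VERDICT (by name: the statement is the Claim_ definition above) =====
theorem kasszahoz_rendel_spec : Claim_equal_kasszahoz_rendel := by
  intro szamok _ _
  unfold Spec_kasszahoz_rendel kasszahoz_rendel kasszahoz_rendel_alt
  simp only [foldl_partition pvParos _ [] [], List.nil_append,
    sorted2_eq_sorted_lex, sorted_lex_split]
  set L := ((PySem.Str.split? szamok ";").getD [])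
  set SE := PySem.List.sorted (L.filter pvParos) (fun x => x) false with hSE
  set SO := PySem.List.sorted (L.filter (fun s => !(pvParos s))) (fun x => x) false with hSO
  have hcount : (SE ++ SO).foldl (fun (n : Int) s => if pvParos s then n + 1 else n) 0
      = (SE.length : Int) := by
    rw [foldl_count, hSE, hSO, countP_sorted_split]; ring
  rw [hcount, PySem.List.slice_to_natCast, PySem.List.slice_from_natCast,
    List.take_left, List.drop_left]
  have g1 : SE = [] ↔ L.filter pvParos = [] := filter_sorted_nil pvParos L
  have g2 : SO = [] ↔ L.filter (fun s => !(pvParos s)) = [] := filter_sorted_nil _ L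
  by_cases h1 : L.filter pvParos = [] <;>
    by_cases h2 : L.filter (fun s => !(pvParos s)) = [] <;>
      [ simp [List.filter, g1.mpr h1, g2.mpr h2, h1, h2];
        simp [List.filter, g1.mpr h1, List.isEmpty_eq_false_iff.mpr (fun h => h2 (g2.mp h)),
          h1, h2, List.length_pos_iff];
        simp [List.filter, g2.mpr h2, List.isEmpty_eq_false_iff.mpr (fun h => h1 (g1.mp h)),
          h1, h2, List.length_pos_iff];
        simp [List.filter, List.isEmpty_eq_false_iff.mpr (fun h => h1 (g1.mp h)),
          List.isEmpty_eq_false_iff.mpr (fun h => h2 (g2.mp h)), h1, h2, List.length_pos_iff] ]
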